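-- pv_equiv track=rewrite | github.com/ABorgna/metnum | src/exp/generador_grafos.py | generar_grafo_union
-- ===== SOURCE A (Python) =====
-- def generar_grafo_trivial(n):
--     """Genera grafo de n vertices aislados en forma de matriz de adyacencias"""
--     return [[0]*n for i in range(0, n)]
--
-- def generar_grafo_union(matrices):
--     """Genera un nuevo grafo que es la union de todos los pasados por param."""
--
--     # calculo cantidad total de nodos
--     n = 0
--     for matriz in matrices:
--         n += len(matriz)
--
--     union = generar_grafo_trivial(n)
--
--     # agrego ejes de cada grafo indexados adecuadamente
--     inicio_index = 0
--     for matriz in matrices: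
--         for i in range(0, len(matriz)):
--             for j in range(0, len(matriz)):
--                 union[inicio_index + i][inicio_index + j] = matriz[i][j]
--         inicio_index += len(matriz)
--     return union
-- ===== SOURCE B (Python) =====
-- def generar_grafo_union(matrices):
--     """Genera un nuevo grafo que es la union de todos los pasados por param."""
--     # Recursive decomposition: block_diag(m :: rest) is
--     #   [ m          | 0 ]
--     #   [ 0 | block_diag(rest) ]
--     if not matrices:
--         return []
--     first = matrices[0]
--     k = len(first)
--     sub = generar_grafo_union(matrices[1:])
--     w = len(sub)
--     top = [[first[i][j] for j in range(k)] + [0] * w for i in range(k)]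
--     bottom = [[0] * k + row for row in sub]
--     return top + bottom
-- ===== Notes on version B (the rewrite author's own statement) =====
-- stated objective: alternative
-- what changed: B replaces A's preallocated n-by-n zero matrix and offset-indexed in-place writes by a recursive divide: block_diag(m::rest) = [m | 0 ; 0 | block_diag(rest)], padding the recursively built submatrix, with no size/offset precomputation (trades speed on many-block inputs for the recursion).
import Mathlib
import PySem

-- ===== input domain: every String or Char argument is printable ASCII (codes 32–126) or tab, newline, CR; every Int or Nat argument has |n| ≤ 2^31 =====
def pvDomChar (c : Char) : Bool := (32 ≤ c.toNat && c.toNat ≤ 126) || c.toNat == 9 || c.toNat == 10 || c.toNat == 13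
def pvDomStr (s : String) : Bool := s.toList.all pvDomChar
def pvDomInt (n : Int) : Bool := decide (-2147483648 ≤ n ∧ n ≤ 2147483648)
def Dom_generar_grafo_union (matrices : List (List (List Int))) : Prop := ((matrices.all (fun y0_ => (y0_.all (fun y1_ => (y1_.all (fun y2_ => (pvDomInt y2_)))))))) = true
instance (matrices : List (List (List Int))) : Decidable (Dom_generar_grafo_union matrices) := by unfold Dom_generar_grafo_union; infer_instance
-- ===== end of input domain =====

-- B replaces A's preallocated zero matrix and offset-indexed in-place writes by a
-- recursive divide: block_diag(m::rest) = [m | 0 ; 0 | block_diag(rest)] (objective: alternative).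

-- ===== PORT A =====
-- [[0]*n for i in range(0, n)]  (range indices unused; n is a nonnegative count of rows)
def generar_grafo_trivial (n : Nat) : List (List Int) :=
  (List.range n).map (fun _ => List.replicate n 0)

-- inner two loops: for i …: for j …: union[inicio+i][inicio+j] = matriz[i][j]
-- matriz[i][j] is in range under Pre_; getD is exact there (outside Pre_ Python raises IndexError)
def pvBlockWrite (u : List (List Int)) (inicio : Nat) (m : List (List Int)) : List (List Int) :=
  (List.range m.length).foldl (fun u i =>
    (List.range m.length).foldl (fun u j =>
      u.modify (inicio + i) (fun row => row.set (inicio + j) ((m.getD i []).getD j 0))) u) u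

def generar_grafo_union (matrices : List (List (List Int))) : List (List Int) :=
  let n := matrices.foldl (fun acc m => acc + m.length) 0
  let union := generar_grafo_trivial n
  (matrices.foldl (fun (s : List (List Int) × Nat) m =>
      (pvBlockWrite s.1 s.2 m, s.2 + m.length)) (union, 0)).1

-- ===== PORT B =====
-- if not matrices: return []; else top = rows of first padded right by len(sub),
-- bottom = rows of the recursive result left-padded by len(first)
def generar_grafo_union_alt (matrices : List (List (List Int))) : List (List Int) :=
  match matrices with
  | [] => []
  | first :: rest =>
    let k := first.length
    let sub := generar_grafo_union_alt rest
    let w := sub.length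
    let top := (List.range k).map (fun i =>
      ((List.range k).map (fun j => (first.getD i []).getD j 0)) ++ List.replicate w 0)
    let bottom := sub.map (fun row => List.replicate k 0 ++ row)
    top ++ bottom

-- ===== PRECONDITION & SPEC =====
-- Pre_ excludes exactly the inputs where A raises IndexError: a block with some row
-- shorter than the block's number of rows (matriz[i][j] out of range).
def Pre_generar_grafo_union (matrices : List (List (List Int))) : Prop :=
  ∀ m ∈ matrices, ∀ row ∈ m, m.length ≤ row.length

instance (matrices : List (List (List Int))) : Decidable (Pre_generar_grafo_union matrices) := by
  unfold Pre_generar_grafo_union; infer_instance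

def pvWitness_generar_grafo_union : List (List (List Int)) :=
  [[[1, 2], [3, 4]], [[7]]]

def Spec_generar_grafo_union (matrices : List (List (List Int))) (out : List (List Int)) : Prop := out = generar_grafo_union_alt matrices
instance (matrices : List (List (List Int))) (out : List (List Int)) : Decidable (Spec_generar_grafo_union matrices out) := by unfold Spec_generar_grafo_union; infer_instance

-- ===== CLAIM (what is proved, stated in full; the proofs are below) =====
def Claim_equal_generar_grafo_union : Prop := ∀ (matrices : List (List (List Int))), Dom_generar_grafo_union matrices → Pre_generar_grafo_union matrices → Spec_generar_grafo_union matrices (generar_grafo_union matrices)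

-- ===== LEMMAS AND PROOFS =====

theorem modify_modify_same {α : Type} (l : List α) (i : Nat) (f g : α → α) :
    (l.modify i f).modify i g = l.modify i (fun a => g (f a)) := by
  induction l generalizing i with
  | nil => simp
  | cons a t ih =>
    cases i with
    | zero => simp
    | succ n => simp [ih]

-- set / modify exactly at the boundary of an append
theorem set_at_len {α : Type} (l r : List α) (x : α) :
    (l ++ r).set l.length x = l ++ r.set 0 x := by
  induction l with
  | nil => simp
  | cons a t ih => simp [ih]

theorem modify_at_len {α : Type} (l r : List α) (f : α → α) :
    (l ++ r).modify l.length f = l ++ r.modify 0 f := by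
  induction l with
  | nil => simp
  | cons a t ih => simp [ih]

-- one row of a block, width n, at column offset off
def pvRowOf (n off : Nat) (m : List (List Int)) (i : Nat) : List Int :=
  List.replicate off 0
    ++ (List.range m.length).map (fun j => (m.getD i []).getD j 0)
    ++ List.replicate (n - off - m.length) 0

-- the rows of one block
def pvRows (n off : Nat) (m : List (List Int)) : List (List Int) :=
  (List.range m.length).map (pvRowOf n off m)

-- block-diagonal matrix of width n with blocks at consecutive offsets from off
def pvBuild (n off : Nat) : List (List (List Int)) → List (List Int)
  | [] => []
  | m :: rest => pvRows n off m ++ pvBuild n (off + m.length) rest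

-- the inner j-loop touches only row (inicio+i)
theorem inner_as_modify (u : List (List Int)) (r : Nat) (inicio : Nat)
    (m : List (List Int)) (i : Nat) :
    (List.range m.length).foldl (fun u j =>
        u.modify r (fun row => row.set (inicio + j) ((m.getD i []).getD j 0))) u
      = u.modify r (fun row =>
          (List.range m.length).foldl (fun row j => row.set (inicio + j) ((m.getD i []).getD j 0)) row) := by
  generalize m.length = k
  induction k generalizing u with
  | zero => exact (List.modify_id _ _).symm
  | succ t ih =>
    rw [List.range_succ]
    simp only [List.foldl_append, List.foldl_cons, List.foldl_nil, ih, modify_modify_same]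

-- one row of the block, written into an all-zero row of width n
theorem row_fill (off k n : Nat) (v : Nat → Int) (h : off + k ≤ n) :
    (List.range k).foldl (fun row j => row.set (off + j) (v j)) (List.replicate n 0)
      = List.replicate off 0 ++ (List.range k).map v ++ List.replicate (n - off - k) 0 := by
  induction k with
  | zero =>
    simp only [List.range_zero, List.foldl_nil, List.map_nil, List.append_nil, Nat.sub_zero]
    rw [List.replicate_append_replicate]
    congr 1
    omega
  | succ t ih =>
    rw [List.range_succ, List.foldl_append, ih (by omega)]
    simp only [List.foldl_cons, List.foldl_nil, List.map_append, List.map_cons, List.map_nil]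
    obtain ⟨w, hw⟩ : ∃ w, n - off - t = w + 1 := ⟨n - off - t - 1, by omega⟩
    have hts : n - off - (t + 1) = w := by omega
    rw [hw, hts, List.replicate_succ,
        show off + t = (List.replicate off (0 : Int) ++ (List.range t).map v).length from by simp,
        set_at_len]
    simp [List.append_assoc]

-- writing a block into rows [off, off+k) of done ++ zeros (done has length off)
theorem blockWrite_eq (done : List (List Int)) (off r n : Nat) (m : List (List Int))
    (hdone : done.length = off) (hk : m.length ≤ r) (hn : off + r ≤ n) :
    pvBlockWrite (done ++ List.replicate r (List.replicate n 0)) off m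
      = (done ++ pvRows n off m) ++ List.replicate (r - m.length) (List.replicate n 0) := by
  unfold pvBlockWrite pvRows
  generalize hrow : pvRowOf n off m = rowf
  have hfill : ∀ i, (List.range m.length).foldl
      (fun row j => row.set (off + j) ((m.getD i []).getD j 0)) (List.replicate n 0) = rowf i := by
    intro i; rw [← hrow]; exact row_fill off m.length n _ (by omega)
  -- induct on a prefix length t ≤ m.length of the outer loop
  suffices h : ∀ t, t ≤ m.length →
      (List.range t).foldl (fun u i =>
        (List.range m.length).foldl (fun u j =>
          u.modify (off + i) (fun row => row.set (off + j) ((m.getD i []).getD j 0))) u)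
        (done ++ List.replicate r (List.replicate n 0))
      = (done ++ (List.range t).map rowf) ++ List.replicate (r - t) (List.replicate n 0) by
    simpa using h m.length le_rfl
  intro t ht
  induction t with
  | zero => simp
  | succ s ih =>
    rw [List.range_succ, List.foldl_append, ih (by omega)]
    simp only [List.foldl_cons, List.foldl_nil]
    rw [inner_as_modify]
    obtain ⟨w, hw⟩ : ∃ w, r - s = w + 1 := ⟨r - s - 1, by omega⟩
    have hrs : r - (s + 1) = w := by omega
    rw [hw, List.replicate_succ,
        show off + s = (done ++ (List.range s).map rowf).length from by simp [hdone],
        modify_at_len]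
    simp only [List.modify_zero_cons, hfill]
    simp [hrs, List.append_assoc]

theorem sum_lengths (matrices : List (List (List Int))) :
    matrices.foldl (fun acc m => acc + m.length) 0 = (matrices.map List.length).sum := by
  rw [List.sum_eq_foldl, List.foldl_map]

-- A's fold equals pvBuild (invariant on done/off)
theorem fold_inv (n : Nat) (ms : List (List (List Int))) :
    ∀ (done : List (List Int)) (off : Nat), done.length = off →
      off + (ms.map List.length).sum ≤ n →
      (ms.foldl (fun (s : List (List Int) × Nat) m =>
          (pvBlockWrite s.1 s.2 m, s.2 + m.length))
        (done ++ List.replicate (n - off) (List.replicate n 0), off)).1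
      = (done ++ pvBuild n off ms)
        ++ List.replicate (n - off - (ms.map List.length).sum) (List.replicate n 0) := by
  induction ms with
  | nil => intro done off h1 h2; simp [pvBuild]
  | cons m rest ih =>
    intro done off h1 h2
    simp only [List.map_cons, List.sum_cons] at h2 ⊢
    simp only [List.foldl_cons, pvBuild]
    rw [blockWrite_eq done off (n - off) n m h1 (by omega) (by omega)]
    have hlen : (done ++ pvRows n off m).length = off + m.length := by
      simp [pvRows, h1]
    have hrw : n - off - m.length = n - (off + m.length) := by omega
    rw [hrw]
    have := ih (done ++ pvRows n off m) (off + m.length) hlen (by omega)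
    rw [this]
    have : n - (off + m.length) - (rest.map List.length).sum
        = n - off - (m.length + (rest.map List.length).sum) := by omega
    rw [this]
    simp [List.append_assoc]

-- left-padding every row of a block diagonal shifts width and offset
theorem build_pad (k : Nat) (ms : List (List (List Int))) :
    ∀ (n off : Nat),
      (pvBuild n off ms).map (fun row => List.replicate k 0 ++ row)
        = pvBuild (k + n) (k + off) ms := by
  induction ms with
  | nil => intro n off; simp [pvBuild]
  | cons m rest ih =>
    intro n off
    simp only [pvBuild, List.map_append]
    congr 1
    · unfold pvRows pvRowOf
      rw [List.map_map]
      apply List.map_congr_left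
      intro i _
      have h1 : k + n - (k + off) - m.length = n - off - m.length := by omega
      simp only [Function.comp, h1, List.replicate_add, List.append_assoc]
    · rw [ih]
      congr 1
      omega

theorem alt_length (ms : List (List (List Int))) :
    (generar_grafo_union_alt ms).length = (ms.map List.length).sum := by
  induction ms with
  | nil => simp [generar_grafo_union_alt]
  | cons m rest ih => simp [generar_grafo_union_alt, ih]

theorem alt_eq_build (ms : List (List (List Int))) :
    generar_grafo_union_alt ms = pvBuild ((ms.map List.length).sum) 0 ms := by
  induction ms with
  | nil => simp [generar_grafo_union_alt, pvBuild]
  | cons m rest ih =>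
    simp only [generar_grafo_union_alt, pvBuild, List.map_cons, List.sum_cons]
    congr 1
    · -- top rows = pvRows n 0 m  with n = m.length + sum rest
      unfold pvRows pvRowOf
      apply List.map_congr_left
      intro i _
      rw [alt_length]
      simp
    · rw [ih, build_pad, Nat.add_zero, Nat.zero_add]

-- ===== VERDICT (by name: the statement is the Claim_ definition above) =====
theorem generar_grafo_union_spec : Claim_equal_generar_grafo_union := by
  intro matrices _ _
  unfold Spec_generar_grafo_union generar_grafo_union generar_grafo_trivial
  simp only [sum_lengths]
  set n := (matrices.map List.length).sum with hn
  have htriv : (List.range n).map (fun _ => List.replicate n (0 : Int))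
      = ([] : List (List Int)) ++ List.replicate (n - 0) (List.replicate n 0) := by
    simp [List.map_const']
  rw [htriv, fold_inv n matrices [] 0 rfl (by omega)]
  have hz : n - 0 - (matrices.map List.length).sum = 0 := by omega
  rw [hz, alt_eq_build, hn]
  simp
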